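-- pv_equiv track=rewrite | github.com/Jaga4512/Bioinformatic_tools | ORF.py | find_orf
-- ===== SOURCE A (Python) =====
-- def find_orf(sequence):
--
--   start_codon = "AUG"
--   stop_codons = ["UAA", "UAG", "UGA"]
--
--   # Find the starting index of the ORF
--   start_index = sequence.find(start_codon)
--   if start_index == -1:
--     return "No ORF found"
--
--   # Find the ending index of the ORF
--   for i in range(start_index + 3, len(sequence), 3):
--     codon = sequence[i:i+3]
--     if codon in stop_codons:
--       end_index = i + 3
--       break
--   else:
--     return "No ORF found"
--
--   orf_length = end_index - start_index
--   if orf_length % 3 == 0: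
--     return str(orf_length)
--   else:
--     return "No ORF found"
-- ===== SOURCE B (Python) =====
-- import re
--
-- _ORF_RE = re.compile(r"AUG(?:...)*?(?:UAA|UAG|UGA)", re.DOTALL)
--
-- def find_orf(sequence):
--   # Anchor at the first AUG; the lazy in-frame repetition of the regex finds the
--   # nearest in-frame stop codon, and len(match) is exactly the ORF length.
--   start_index = sequence.find("AUG")
--   if start_index == -1:
--     return "No ORF found"
--   match = _ORF_RE.match(sequence[start_index:])
--   if match is None:
--     return "No ORF found"
--   return str(len(match.group(0)))
-- ===== Notes on version B (the rewrite author's own statement) =====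
-- stated objective: idiomatic
-- what changed: Replaces the explicit step-3 index loop plus break/else and the (always-true) mod-3 check with a single compiled regex whose lazy in-frame repetition, anchored at the first AUG, finds the nearest in-frame stop codon and yields the ORF length as len(match.group(0)).
import Mathlib
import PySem

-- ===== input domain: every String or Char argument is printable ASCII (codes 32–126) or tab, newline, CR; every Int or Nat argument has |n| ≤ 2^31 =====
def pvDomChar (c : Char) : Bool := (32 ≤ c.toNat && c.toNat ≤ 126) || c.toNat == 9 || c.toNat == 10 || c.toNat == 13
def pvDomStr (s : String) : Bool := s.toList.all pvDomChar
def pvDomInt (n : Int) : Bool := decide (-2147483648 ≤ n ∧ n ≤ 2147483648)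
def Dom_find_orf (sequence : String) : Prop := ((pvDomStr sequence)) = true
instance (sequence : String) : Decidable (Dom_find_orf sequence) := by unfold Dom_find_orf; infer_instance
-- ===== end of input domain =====

-- B replaces A's explicit step-3 index loop (break/else + always-true mod-3 check) by an
-- anchored lazy regex; the regex engine's backtracking for this pattern is ported by hand.


-- ===== PORT A =====
-- the for-loop over range(start_index+3, len(sequence), 3) with break/else: first stop codon gives end_index
def findOrfLoopA (sequence : String) : List Int → Option Int
  | [] => none
  | i :: rest =>
    let codon := PySem.Str.slice sequence (some i) (some (i + 3))
    if codon ∈ (["UAA", "UAG", "UGA"] : List String) then some (i + 3)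
    else findOrfLoopA sequence rest

def find_orf (sequence : String) : String :=
  let start_index := PySem.Str.find sequence "AUG"
  if start_index == -1 then "No ORF found"
  else
    match findOrfLoopA sequence (PySem.List.pyRange (start_index + 3) (PySem.Str.len sequence) 3) with
    | none => "No ORF found"
    | some end_index =>
      let orf_length := end_index - start_index
      if PySem.Int.mod orf_length 3 == 0 then PySem.Int.toStr orf_length
      else "No ORF found"

-- ===== PORT B =====
-- hand port (exact) of the engine's backtracking for the lazy repetition in
-- re.match(r'AUG(?:...)*?(?:UAA|UAG|UGA)', s, re.DOTALL) after 'AUG' matched: at pos it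
-- first tries a stop codon, else consumes one '(?:...)' group (3 arbitrary chars, DOTALL) and retries.
def reLazyStop (s : List Char) (pos : Nat) : Option Nat :=
  if (s.drop pos).take 3 ∈ (["UAA".toList, "UAG".toList, "UGA".toList] : List (List Char)) then
    some (pos + 3)
  else if h : pos + 3 ≤ s.length then reLazyStop s (pos + 3)
  else none
termination_by s.length - pos
decreasing_by omega

def find_orf_alt (sequence : String) : String :=
  let start_index := PySem.Str.find sequence "AUG"
  if start_index == -1 then "No ORF found"
  else
    let suffix := (PySem.Str.slice sequence (some start_index) none).toList
    -- re.match anchors at 0: the literal 'AUG' must match first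
    if suffix.take 3 = "AUG".toList then
      match reLazyStop suffix 3 with
      | some m => PySem.Int.toStr (m : Int)
      | none => "No ORF found"
    else "No ORF found"

-- ===== PRECONDITION & SPEC =====
def Spec_find_orf (sequence : String) (out : String) : Prop := out = find_orf_alt sequence
instance (sequence : String) (out : String) : Decidable (Spec_find_orf sequence out) := by unfold Spec_find_orf; infer_instance

-- ===== CLAIM (what is proved, stated in full; the proofs are below) =====
def Claim_equal_find_orf : Prop := ∀ (sequence : String), Dom_find_orf sequence → Spec_find_orf sequence (find_orf sequence)

-- ===== LEMMAS AND PROOFS =====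

lemma pyRange3_empty (a b : Int) (h : b ≤ a) : PySem.List.pyRange a b 3 = [] := by
  rw [PySem.List.pyRange_of_pos a b (by norm_num)]
  simp [if_neg (not_lt.mpr h)]

lemma pyRange3_cons (a b : Int) (h : a < b) :
    PySem.List.pyRange a b 3 = a :: PySem.List.pyRange (a + 3) b 3 := by
  rw [PySem.List.pyRange_of_pos a b (by norm_num), PySem.List.pyRange_of_pos (a + 3) b (by norm_num)]
  rw [if_pos h]
  have hcnt : ((b - a + 3 - 1) / 3).toNat
      = (if a + 3 < b then ((b - (a + 3) + 3 - 1) / 3).toNat else 0) + 1 := by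
    split_ifs with h3 <;> omega
  rw [hcnt, List.range_succ_eq_map]
  simp only [List.map_cons, List.map_map]
  refine List.cons_eq_cons.mpr ⟨by omega, ?_⟩
  apply List.map_congr_left
  intro k _
  simp [Function.comp, Nat.succ_eq_add_one]
  ring

lemma codon_iff (sequence : String) (i : Nat) :
    (PySem.Str.slice sequence (some (i : Int)) (some ((i : Int) + 3)) ∈ (["UAA", "UAG", "UGA"] : List String))
    ↔ ((sequence.toList.drop i).take 3 ∈ (["UAA".toList, "UAG".toList, "UGA".toList] : List (List Char))) := by
  have h : (PySem.Str.slice sequence (some (i : Int)) (some ((i : Int) + 3))).toList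
      = (sequence.toList.drop i).take 3 := by
    rw [PySem.Str.toList_slice, PySem.Chars.slice_eq_listSlice]
    have h3 : ((i : Int) + 3) = ((i : Int) + ((3 : Nat) : Int)) := by norm_num
    rw [h3, PySem.List.slice_natCast_add]
  simp only [List.mem_cons, List.not_mem_nil, or_false, ← String.toList_inj, h]

lemma reLazyStop_shape (s : List Char) (fuel : Nat) : ∀ pos m, s.length - pos ≤ fuel →
    reLazyStop s pos = some m → ∃ k, m = pos + 3 * k + 3 := by
  induction fuel with
  | zero =>
    intro pos m hf h
    rw [reLazyStop] at h
    split_ifs at h with h1 h2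
    · exact ⟨0, by have := Option.some.inj h; omega⟩
    · exact absurd h2 (by omega)
  | succ n ih =>
    intro pos m hf h
    rw [reLazyStop] at h
    split_ifs at h with h1 h2
    · exact ⟨0, by have := Option.some.inj h; omega⟩
    · obtain ⟨k, hk⟩ := ih (pos + 3) m (by omega) h
      exact ⟨k + 1, by omega⟩

lemma loop_eq_nil (sequence : String) (S j : Nat) (h : sequence.toList.length ≤ S + j) :
    findOrfLoopA sequence (PySem.List.pyRange ((S : Int) + (j : Int)) (PySem.Str.len sequence) 3)
      = Option.map (fun m : Nat => ((S : Int) + (m : Int))) (reLazyStop (sequence.toList.drop S) j) := by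
  have hsl : sequence.toList.length = sequence.length := String.length_toList
  have hA : PySem.List.pyRange ((S : Int) + (j : Int)) (PySem.Str.len sequence) 3 = [] := by
    apply pyRange3_empty
    simp only [PySem.Str.len_eq]
    omega
  rw [hA, reLazyStop]
  have hdrop : (sequence.toList.drop S).drop j = [] := by
    rw [List.drop_drop]
    exact List.drop_eq_nil_of_le (by omega)
  rw [hdrop]
  rw [if_neg (by decide), dif_neg (by rw [List.length_drop]; omega)]
  rfl

lemma loop_eq (sequence : String) (S : Nat) (fuel : Nat) : ∀ j : Nat,
    sequence.toList.length - (S + j) ≤ fuel →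
    findOrfLoopA sequence (PySem.List.pyRange ((S : Int) + (j : Int)) (PySem.Str.len sequence) 3)
      = Option.map (fun m : Nat => ((S : Int) + (m : Int))) (reLazyStop (sequence.toList.drop S) j) := by
  have hsl : sequence.toList.length = sequence.length := String.length_toList
  induction fuel with
  | zero =>
    intro j hf
    exact loop_eq_nil sequence S j (by omega)
  | succ n ih =>
    intro j hf
    by_cases hlt : S + j < sequence.toList.length
    · have hcons : PySem.List.pyRange ((S : Int) + (j : Int)) (PySem.Str.len sequence) 3
          = ((S : Int) + (j : Int)) :: PySem.List.pyRange ((S : Int) + (j : Int) + 3) (PySem.Str.len sequence) 3 := by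
        apply pyRange3_cons
        simp only [PySem.Str.len_eq]
        omega
      rw [hcons, reLazyStop]
      have hdt : ((sequence.toList.drop S).drop j).take 3 = (sequence.toList.drop (S + j)).take 3 := by
        rw [List.drop_drop]
      have hcast : ((S : Int) + (j : Int)) = (((S + j : Nat) : Int)) := by push_cast; ring
      have hcod := codon_iff sequence (S + j)
      simp only [findOrfLoopA]
      by_cases hstop : (sequence.toList.drop (S + j)).take 3
          ∈ (["UAA".toList, "UAG".toList, "UGA".toList] : List (List Char))
      · rw [if_pos (show PySem.Str.slice sequence (some ((S : Int) + (j : Int)))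
              (some ((S : Int) + (j : Int) + 3)) ∈ (["UAA", "UAG", "UGA"] : List String) by
            rw [hcast]; exact hcod.mpr hstop),
            if_pos (show ((sequence.toList.drop S).drop j).take 3
              ∈ (["UAA".toList, "UAG".toList, "UGA".toList] : List (List Char)) by
            rw [hdt]; exact hstop)]
        simp only [Option.map_some, Option.some.injEq]
        omega
      · rw [if_neg (by rw [hcast]; exact fun hc => hstop (hcod.mp hc)),
            if_neg (by rw [hdt]; exact hstop)]
        by_cases hrec : j + 3 ≤ (sequence.toList.drop S).length
        · rw [dif_pos hrec]
          have hrec2 := ih (j + 3) (by omega)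
          have hc2 : ((S : Int) + ((j + 3 : Nat) : Int)) = ((S : Int) + (j : Int) + 3) := by
            push_cast; ring
          rw [hc2] at hrec2
          exact hrec2
        · rw [dif_neg hrec]
          rw [List.length_drop] at hrec
          have hA : PySem.List.pyRange ((S : Int) + (j : Int) + 3) (PySem.Str.len sequence) 3 = [] := by
            apply pyRange3_empty
            simp only [PySem.Str.len_eq]
            omega
          rw [hA]
          rfl
    · exact loop_eq_nil sequence S j (by omega)

-- ===== VERDICT (by name: the statement is the Claim_ definition above) =====
theorem find_orf_spec : Claim_equal_find_orf := by
  unfold Claim_equal_find_orf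
  intro sequence _
  unfold Spec_find_orf
  simp only [find_orf, find_orf_alt, PySem.Str.find_eq]
  by_cases hf : PySem.Chars.find sequence.toList "AUG".toList = -1
  · rw [hf]
    simp
  · have hne : (PySem.Chars.find sequence.toList "AUG".toList == -1) = false :=
      beq_eq_false_iff_ne.mpr hf
    simp only [hne, Bool.false_eq_true, if_false]
    have hff0 : PySem.Chars.findFrom sequence.toList "AUG".toList ((0 : Nat) : Int) none
        = PySem.Chars.find sequence.toList "AUG".toList := by
      simp [PySem.Chars.findFrom_zero]
    have hspec := PySem.Chars.findFrom_natCast_spec sequence.toList "AUG".toList 0 (by omega)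
      (by rw [hff0]; exact hf)
    rw [hff0] at hspec
    obtain ⟨hge, hpre, -⟩ := hspec
    have hge0 : (0 : Int) ≤ PySem.Chars.find sequence.toList "AUG".toList := by exact_mod_cast hge
    set F : Int := PySem.Chars.find sequence.toList "AUG".toList with hF
    set S : Nat := F.toNat with hS
    have hfS : F = (S : Int) := by omega
    have hsuffix : (PySem.Str.slice sequence (some F) none).toList = sequence.toList.drop S := by
      rw [PySem.Str.toList_slice, PySem.Chars.slice_eq_listSlice,
        PySem.List.slice_from sequence.toList hge0]
    have htake : (sequence.toList.drop S).take 3 = "AUG".toList := by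
      have h3 : ("AUG".toList).length = 3 := by decide
      have := List.prefix_iff_eq_take.mp hpre
      rw [h3] at this
      exact this.symm
    rw [hsuffix, if_pos htake]
    have hloop := loop_eq sequence S sequence.toList.length 3 (by omega)
    have hc3 : ((S : Int) + ((3 : Nat) : Int)) = F + 3 := by rw [hfS]; norm_num
    rw [hc3] at hloop
    rw [hloop]
    cases hB : reLazyStop (sequence.toList.drop S) 3 with
    | none => rfl
    | some m =>
      obtain ⟨k, hk⟩ := reLazyStop_shape (sequence.toList.drop S) (sequence.toList.drop S).length 3 m
        (by omega) hB
      simp only [Option.map_some]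
      have hlen : ((S : Int) + (m : Int)) - F = (m : Int) := by rw [hfS]; ring
      rw [hlen]
      have hm3 : ((m : Nat) : Int) = 3 * ((k : Int) + 2) := by omega
      have hdvd : (3 : Int) ∣ ((m : Nat) : Int) := ⟨(k : Int) + 2, hm3⟩
      simp [hdvd]
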